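-- pv_equiv track=rewrite | github.com/bryan-clauser/AIContractTesting | diff_engine.py | _diff_fields
-- ===== SOURCE A (Python) =====
-- from typing import Dict, List, Any, Set
--
-- def _diff_fields(
--     path: str,
--     method: str,
--     old_fields: Dict[str, str],
--     new_fields: Dict[str, str]
-- ) -> List[str]:
--     """Compare response field schemas between old and new specs."""
--     changes = []
--
--     old_field_names = set(old_fields.keys())
--     new_field_names = set(new_fields.keys())
--
--     added_fields = new_field_names - old_field_names
--     removed_fields = old_field_names - new_field_names
--     common_fields = old_field_names & new_field_names
--
--     for field in sorted(added_fields):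
--         field_type = new_fields[field]
--         changes.append(f"Endpoint {path} {method}: field '{field}' added (type: {field_type})")
--
--     for field in sorted(removed_fields):
--         field_type = old_fields[field]
--         changes.append(f"Endpoint {path} {method}: field '{field}' removed (type: {field_type})")
--
--     # Detect type changes
--     for field in sorted(common_fields):
--         old_type = old_fields[field]
--         new_type = new_fields[field]
--
--         if old_type != new_type:
--             changes.append(
--                 f"Endpoint {path} {method}: field '{field}' type changed from {old_type} to {new_type}"
--             )
--
--     return changes
-- ===== SOURCE B (Python) =====
-- def _diff_fields(path, method, old_fields, new_fields):
--     """Two-pointer merge of the two item lists sorted by field name (a sorted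
--     merge-join): no sets, no membership tests, no dict lookups."""
--     old_items = sorted(old_fields.items(), key=lambda kv: kv[0])
--     new_items = sorted(new_fields.items(), key=lambda kv: kv[0])
--     added, removed, changed = [], [], []
--     i = j = 0
--     while i < len(old_items) and j < len(new_items):
--         (ok, ot), (nk, nt) = old_items[i], new_items[j]
--         if ok == nk:
--             if ot != nt:
--                 changed.append(f"Endpoint {path} {method}: field '{ok}' type changed from {ot} to {nt}")
--             i += 1
--             j += 1
--         elif ok < nk:
--             removed.append(f"Endpoint {path} {method}: field '{ok}' removed (type: {ot})")
--             i += 1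
--         else:
--             added.append(f"Endpoint {path} {method}: field '{nk}' added (type: {nt})")
--             j += 1
--     removed += [f"Endpoint {path} {method}: field '{k}' removed (type: {t})" for k, t in old_items[i:]]
--     added += [f"Endpoint {path} {method}: field '{k}' added (type: {t})" for k, t in new_items[j:]]
--     return added + removed + changed
-- ===== Notes on version B (the rewrite author's own statement) =====
-- stated objective: alternative
-- what changed: Replaces A's hash-set difference/intersection plus three separate sorted key loops with dict lookups by a sorted merge-join: both item lists are sorted once by field name and a single two-pointer merge classifies each field by comparing the current heads, carrying the types along so no set operation or dict lookup is ever performed.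
import Mathlib
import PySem

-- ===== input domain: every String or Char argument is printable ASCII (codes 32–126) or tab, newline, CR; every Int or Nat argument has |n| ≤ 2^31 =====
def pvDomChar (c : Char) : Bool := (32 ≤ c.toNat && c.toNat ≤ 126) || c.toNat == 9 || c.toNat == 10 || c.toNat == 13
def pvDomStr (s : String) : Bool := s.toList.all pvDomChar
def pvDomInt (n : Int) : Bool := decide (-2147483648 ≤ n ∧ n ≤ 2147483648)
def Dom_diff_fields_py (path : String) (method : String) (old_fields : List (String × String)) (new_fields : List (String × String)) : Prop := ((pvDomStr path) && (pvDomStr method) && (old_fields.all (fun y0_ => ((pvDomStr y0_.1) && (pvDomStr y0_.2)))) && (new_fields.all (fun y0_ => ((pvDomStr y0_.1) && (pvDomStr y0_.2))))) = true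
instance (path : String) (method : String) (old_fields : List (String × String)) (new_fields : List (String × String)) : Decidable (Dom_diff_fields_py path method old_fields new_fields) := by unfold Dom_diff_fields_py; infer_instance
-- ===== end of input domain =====

-- B replaces A's set differences/intersection and three sorted key loops with dict lookups by a
-- sorted merge-join: one two-pointer merge of the two item lists sorted by field name (objective: alternative algorithm).

-- ===== PORT A =====
-- Dict lookups new_fields[field] / old_fields[field] are total here (the loop variable is a key of that
-- dict by construction), so getD with "" is exact.
def diff_fields_py (path : String) (method : String) (old_fields : List (String × String)) (new_fields : List (String × String)) : List String :=
  let old_d := PySem.Dict.ofList old_fields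
  let new_d := PySem.Dict.ofList new_fields
  let changes : List String := []
  let old_field_names := PySem.Set.ofList old_d.keys
  let new_field_names := PySem.Set.ofList new_d.keys
  let added_fields := PySem.Set.diff new_field_names old_field_names
  let removed_fields := PySem.Set.diff old_field_names new_field_names
  let common_fields := PySem.Set.inter old_field_names new_field_names
  let changes := (PySem.List.sorted added_fields (fun x => x) false).foldl
    (fun acc field =>
      let field_type := new_d.getD field ""
      acc ++ ["Endpoint " ++ path ++ " " ++ method ++ ": field '" ++ field ++ "' added (type: " ++ field_type ++ ")"]) changes
  let changes := (PySem.List.sorted removed_fields (fun x => x) false).foldl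
    (fun acc field =>
      let field_type := old_d.getD field ""
      acc ++ ["Endpoint " ++ path ++ " " ++ method ++ ": field '" ++ field ++ "' removed (type: " ++ field_type ++ ")"]) changes
  let changes := (PySem.List.sorted common_fields (fun x => x) false).foldl
    (fun acc field =>
      let old_type := old_d.getD field ""
      let new_type := new_d.getD field ""
      if old_type ≠ new_type then
        acc ++ ["Endpoint " ++ path ++ " " ++ method ++ ": field '" ++ field ++ "' type changed from " ++ old_type ++ " to " ++ new_type]
      else acc) changes
  changes

-- ===== PORT B =====
-- The while loop of Source B as the obvious structural recursion on the two sorted item lists,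
-- with the trailing `old_items[i:]` / `new_items[j:]` comprehensions as the base cases.
def pvMergeB (mA mR : String → String → String) (mC : String → String → String → String) :
    List (String × String) → List (String × String) → List String × List String × List String
  | [], ns => (ns.map (fun p => mA p.1 p.2), [], [])
  | o :: os, [] => ([], (o :: os).map (fun p => mR p.1 p.2), [])
  | o :: os, n :: ns =>
    if o.1 = n.1 then
      let r := pvMergeB mA mR mC os ns
      if o.2 ≠ n.2 then (r.1, r.2.1, mC o.1 o.2 n.2 :: r.2.2) else r
    else if o.1 < n.1 then
      let r := pvMergeB mA mR mC os (n :: ns)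
      (r.1, mR o.1 o.2 :: r.2.1, r.2.2)
    else
      let r := pvMergeB mA mR mC (o :: os) ns
      (mA n.1 n.2 :: r.1, r.2.1, r.2.2)

def diff_fields_py_alt (path : String) (method : String) (old_fields : List (String × String)) (new_fields : List (String × String)) : List String :=
  let old_items := PySem.List.sorted (PySem.Dict.ofList old_fields).items (fun kv => kv.1) false
  let new_items := PySem.List.sorted (PySem.Dict.ofList new_fields).items (fun kv => kv.1) false
  let r := pvMergeB
    (fun k t => "Endpoint " ++ path ++ " " ++ method ++ ": field '" ++ k ++ "' added (type: " ++ t ++ ")")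
    (fun k t => "Endpoint " ++ path ++ " " ++ method ++ ": field '" ++ k ++ "' removed (type: " ++ t ++ ")")
    (fun k ot nt => "Endpoint " ++ path ++ " " ++ method ++ ": field '" ++ k ++ "' type changed from " ++ ot ++ " to " ++ nt)
    old_items new_items
  r.1 ++ r.2.1 ++ r.2.2

-- ===== PRECONDITION & SPEC =====
def Spec_diff_fields_py (path : String) (method : String) (old_fields : List (String × String)) (new_fields : List (String × String)) (out : List String) : Prop := out = diff_fields_py_alt path method old_fields new_fields
instance (path : String) (method : String) (old_fields : List (String × String)) (new_fields : List (String × String)) (out : List String) : Decidable (Spec_diff_fields_py path method old_fields new_fields out) := by unfold Spec_diff_fields_py; infer_instance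

-- ===== CLAIM (what is proved, stated in full; the proofs are below) =====
def Claim_equal_diff_fields_py : Prop := ∀ (path : String) (method : String) (old_fields : List (String × String)) (new_fields : List (String × String)), Dom_diff_fields_py path method old_fields new_fields → Spec_diff_fields_py path method old_fields new_fields (diff_fields_py path method old_fields new_fields)

-- ===== LEMMAS AND PROOFS =====

-- Two strictly-increasing lists with the same members are equal.
lemma pv_eq_of_pairwise_lt_ext {l₁ l₂ : List String}
    (s1 : l₁.Pairwise (· < ·)) (s2 : l₂.Pairwise (· < ·))
    (h : ∀ x, x ∈ l₁ ↔ x ∈ l₂) : l₁ = l₂ :=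
  ((List.perm_ext_iff_of_nodup (s1.imp ne_of_lt) (s2.imp ne_of_lt)).2 h).eq_of_pairwise
    (fun _ _ _ _ hab hba => absurd hba (asymm hab)) s1 s2

-- A sorted list whose underlying list has no duplicates is strictly increasing.
lemma pv_sorted_pairwise_lt (xs : List String) (h : xs.Nodup) :
    (PySem.List.sorted xs (fun x => x) false).Pairwise (· < ·) := by
  have hle := PySem.List.sorted_pairwise (key := fun x => x) (xs := xs)
  have hnd : (PySem.List.sorted xs (fun x => x) false).Nodup :=
    (PySem.List.sorted_perm xs (fun x => x) false).nodup_iff.2 h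
  exact (hle.and hnd).imp (fun hp => lt_of_le_of_ne hp.1 hp.2)

-- Sorting a nodup-keyed dict's items by key = mapping the values back onto the sorted key list.
lemma pv_sorted_items (d : PySem.Dict String String) (hnd : d.keys.Nodup) :
    PySem.List.sorted d.items (fun kv => kv.1) false
      = (PySem.List.sorted d.keys (fun x => x) false).map (fun k => (k, d.getD k "")) := by
  apply PySem.List.sorted_eq_of_perm_of_pairwise_lt
  · rw [PySem.Dict.items_eq_map_keys d hnd ""]
    exact (PySem.List.sorted_perm d.keys (fun x => x) false).map _
  · exact List.Pairwise.map _ (fun a b h => h) (pv_sorted_pairwise_lt d.keys hnd)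

lemma pv_merge_spec (mA mR : String → String → String) (mC : String → String → String → String)
    (ov nv : String → String) :
    ∀ (ka kb : List String), ka.Pairwise (· < ·) → kb.Pairwise (· < ·) →
      pvMergeB mA mR mC (ka.map (fun k => (k, ov k))) (kb.map (fun k => (k, nv k)))
        = ((kb.filter (fun k => !ka.contains k)).map (fun k => mA k (nv k)),
           (ka.filter (fun k => !kb.contains k)).map (fun k => mR k (ov k)),
           (ka.filter (fun k => kb.contains k && decide (ov k ≠ nv k))).map (fun k => mC k (ov k) (nv k))) := by
  intro ka
  induction ka with
  | nil =>
    intro kb _ _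
    simp [pvMergeB]
  | cons k ka ihA =>
    intro kb hka
    induction kb with
    | nil =>
      intro _
      simp [pvMergeB]
    | cons k' kb ihB =>
      intro hkb
      have hk : ∀ x ∈ ka, k < x := fun x hx => List.rel_of_pairwise_cons hka hx
      have hk' : ∀ x ∈ kb, k' < x := fun x hx => List.rel_of_pairwise_cons hkb hx
      simp only [List.map_cons]
      rcases lt_trichotomy k k' with hlt | heq | hgt
      · -- k < k' : k is removed
        rw [pvMergeB]
        rw [if_neg (by simpa using ne_of_lt hlt), if_pos (by simpa using hlt)]
        rw [show ((k', nv k') :: kb.map (fun k => (k, nv k))) = (k' :: kb).map (fun k => (k, nv k)) from rfl]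
        rw [ihA (k' :: kb) hka.of_cons hkb]
        have hknotin : k ∉ k' :: kb := by
          intro hmem
          rcases List.mem_cons.1 hmem with h | h
          · exact absurd h (ne_of_lt hlt)
          · exact absurd rfl (ne_of_lt (lt_trans hlt (hk' k h)))
        have hne : ∀ x ∈ k' :: kb, x ≠ k := by
          intro x hx
          rcases List.mem_cons.1 hx with h | h
          · exact (ne_of_lt (h ▸ hlt)).symm
          · exact (ne_of_lt (lt_trans hlt (hk' x h))).symm
        refine Prod.ext ?_ (Prod.ext ?_ ?_) <;> dsimp only
        · congr 1
          apply List.filter_congr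
          intro x hx
          simp [hne x hx]
        · rw [List.filter_cons]
          simp [hknotin]
        · rw [List.filter_cons]
          simp [hknotin]
      · -- k = k' : common field
        subst heq
        rw [pvMergeB]
        rw [if_pos (show ((k, ov k)).1 = ((k, nv k)).1 from rfl)]
        rw [ihA kb hka.of_cons hkb.of_cons]
        have hne : ∀ x ∈ ka, x ≠ k := fun x hx => (ne_of_lt (hk x hx)).symm
        have hne' : ∀ x ∈ kb, x ≠ k := fun x hx => (ne_of_lt (hk' x hx)).symm
        by_cases hv : ov k ≠ nv k
        · rw [if_pos (show ((k, ov k)).2 ≠ ((k, nv k)).2 from hv)]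
          refine Prod.ext ?_ (Prod.ext ?_ ?_) <;> dsimp only <;>
            rw [List.filter_cons] <;> simp [hv] <;> (congr 1; apply List.filter_congr; intro x hx)
          · simp [hne' x hx]
          · simp [hne x hx]
          · simp [hne x hx]
        · rw [if_neg (show ¬ ((k, ov k)).2 ≠ ((k, nv k)).2 from hv)]
          refine Prod.ext ?_ (Prod.ext ?_ ?_) <;> dsimp only <;>
            rw [List.filter_cons] <;> simp [hv] <;> (congr 1; apply List.filter_congr; intro x hx)
          · simp [hne' x hx]
          · simp [hne x hx]
          · simp [hne x hx]
      · -- k > k' : k' is added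
        rw [pvMergeB]
        rw [if_neg (show ¬ ((k, ov k)).1 = ((k', nv k')).1 from ne_of_gt hgt),
            if_neg (show ¬ ((k, ov k)).1 < ((k', nv k')).1 from not_lt.2 (le_of_lt hgt))]
        rw [show ((k, ov k) :: ka.map (fun k => (k, ov k))) = (k :: ka).map (fun k => (k, ov k)) from rfl]
        rw [ihB hkb.of_cons]
        have hk'notin : k' ∉ k :: ka := by
          intro hmem
          rcases List.mem_cons.1 hmem with h | h
          · exact absurd h.symm (ne_of_gt hgt)
          · exact absurd rfl (ne_of_lt (lt_trans hgt (hk k' h))).symm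
        have hne : ∀ x ∈ k :: ka, x ≠ k' := by
          intro x hx
          rcases List.mem_cons.1 hx with h | h
          · exact h ▸ (ne_of_gt hgt)
          · exact (ne_of_gt (lt_trans hgt (hk x h)))
        refine Prod.ext ?_ (Prod.ext ?_ ?_) <;> dsimp only
        · rw [List.filter_cons]; simp [hk'notin]
        · congr 1
          apply List.filter_congr; intro x hx; simp [hne x hx]
        · congr 1
          apply List.filter_congr; intro x hx; simp [hne x hx]


-- A's Prop-`if` step rewritten as a Bool-`if` step, so foldl_append_if applies.
lemma pv_ite_decide (o n : PySem.Dict String String) (mC : String → String) :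
    (fun (acc : List String) field =>
        if o.getD field "" ≠ n.getD field "" then acc ++ [mC field] else acc)
    = (fun acc field =>
        if (fun f => decide (o.getD f "" ≠ n.getD f "")) field then acc ++ [mC field] else acc) := by
  funext acc field
  by_cases h : o.getD field "" ≠ n.getD field "" <;> simp [h]

-- ===== VERDICT (by name: the statement is the Claim_ definition above) =====
theorem diff_fields_py_spec : Claim_equal_diff_fields_py := by
  unfold Claim_equal_diff_fields_py
  intro path method old_fields new_fields _
  unfold Spec_diff_fields_py diff_fields_py diff_fields_py_alt
  dsimp only
  set o := PySem.Dict.ofList old_fields with ho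
  set n := PySem.Dict.ofList new_fields with hn
  have hndo : o.keys.Nodup := PySem.Dict.nodup_keys_ofList old_fields
  have hndn : n.keys.Nodup := PySem.Dict.nodup_keys_ofList new_fields
  have hpa : (PySem.List.sorted o.keys (fun x => x) false).Pairwise (· < ·) :=
    pv_sorted_pairwise_lt o.keys hndo
  have hpb : (PySem.List.sorted n.keys (fun x => x) false).Pairwise (· < ·) :=
    pv_sorted_pairwise_lt n.keys hndn
  set kaS := PySem.List.sorted o.keys (fun x => x) false with hka
  set kbS := PySem.List.sorted n.keys (fun x => x) false with hkb
  -- B side: sorted items are the sorted key lists with the values mapped back on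
  rw [pv_sorted_items o hndo, pv_sorted_items n hndn,
    pv_merge_spec _ _ _ (fun k => o.getD k "") (fun k => n.getD k "") kaS kbS hpa hpb]
  -- A side: the three foldl loops are maps / a filtered map
  set mC : String → String := fun field =>
    "Endpoint " ++ path ++ " " ++ method ++ ": field '" ++ field ++ "' type changed from " ++ o.getD field "" ++ " to " ++ n.getD field "" with hmC
  simp only [PySem.List.foldl_append_singleton_eq_map, List.nil_append]
  rw [pv_ite_decide o n mC, PySem.List.foldl_append_if]
  -- the three sorted category lists are filters of the sorted key lists
  have hadd : PySem.List.sorted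
      (PySem.Set.diff (PySem.Set.ofList n.keys) (PySem.Set.ofList o.keys)) (fun x => x) false
      = kbS.filter (fun k => !kaS.contains k) := by
    apply pv_eq_of_pairwise_lt_ext
      (pv_sorted_pairwise_lt _ (PySem.Set.nodup_diff (PySem.Set.ofList n.keys) (PySem.Set.ofList o.keys) (PySem.Set.nodup_ofList n.keys)))
      (hpb.filter _)
    intro x
    simp [PySem.List.mem_sorted, PySem.Set.mem_diff, PySem.Set.mem_ofList, List.mem_filter, hka, hkb]
  have hrem : PySem.List.sorted
      (PySem.Set.diff (PySem.Set.ofList o.keys) (PySem.Set.ofList n.keys)) (fun x => x) false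
      = kaS.filter (fun k => !kbS.contains k) := by
    apply pv_eq_of_pairwise_lt_ext
      (pv_sorted_pairwise_lt _ (PySem.Set.nodup_diff (PySem.Set.ofList o.keys) (PySem.Set.ofList n.keys) (PySem.Set.nodup_ofList o.keys)))
      (hpa.filter _)
    intro x
    simp [PySem.List.mem_sorted, PySem.Set.mem_diff, PySem.Set.mem_ofList, List.mem_filter, hka, hkb]
  have hchg : (PySem.List.sorted
        (PySem.Set.inter (PySem.Set.ofList o.keys) (PySem.Set.ofList n.keys)) (fun x => x) false).filter
        (fun f => decide (o.getD f "" ≠ n.getD f ""))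
      = kaS.filter (fun k => kbS.contains k && decide (o.getD k "" ≠ n.getD k "")) := by
    apply pv_eq_of_pairwise_lt_ext
      ((pv_sorted_pairwise_lt _ (PySem.Set.nodup_inter (PySem.Set.ofList o.keys) (PySem.Set.ofList n.keys) (PySem.Set.nodup_ofList o.keys))).filter _)
      (hpa.filter _)
    intro x
    simp only [List.mem_filter, PySem.List.mem_sorted, PySem.Set.mem_inter, PySem.Set.mem_ofList,
      Bool.and_eq_true, List.contains_eq_mem, hka, hkb]
    constructor
    · rintro ⟨⟨h1, h2⟩, h3⟩
      exact ⟨by simpa [PySem.List.mem_sorted] using h1, by simpa [PySem.List.mem_sorted] using h2, h3⟩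
    · rintro ⟨h1, h2, h3⟩
      exact ⟨⟨by simpa [PySem.List.mem_sorted] using h1, by simpa [PySem.List.mem_sorted] using h2⟩, h3⟩
  rw [hadd, hrem, hchg]
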